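-- pv_equiv track=rewrite | github.com/dkdleljh/wedding-expo-scraper | wedding_expo_scraper/tistory_publisher.py | _normalize_location_label
-- ===== SOURCE A (Python) =====
-- def _normalize_location_label(location: str) -> str:
--     text = str(location).strip()
--     if not text:
--         return "N/A"
--     for separator in ("(", ","):
--         if separator in text:
--             text = text.split(separator, 1)[0].strip()
--     return text or "N/A"
-- ===== SOURCE B (Python) =====
-- def _normalize_location_label(location: str) -> str:
--     text = str(location).strip()
--     prefix = []
--     for ch in text:
--         if ch in "(,":
--             cut = "".join(prefix).strip()
--             return cut or "N/A"
--         prefix.append(ch)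
--     return text or "N/A"
-- ===== Notes on version B (the rewrite author's own statement) =====
-- stated objective: simpler
-- what changed: Replaces A's staged pipeline of split-and-strip passes (cut at '(' over the whole text, then re-scan and cut at ',') by one left-to-right character scan with an accumulator that returns early at the first separator character, so the text is traversed once and never split.
import Mathlib
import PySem

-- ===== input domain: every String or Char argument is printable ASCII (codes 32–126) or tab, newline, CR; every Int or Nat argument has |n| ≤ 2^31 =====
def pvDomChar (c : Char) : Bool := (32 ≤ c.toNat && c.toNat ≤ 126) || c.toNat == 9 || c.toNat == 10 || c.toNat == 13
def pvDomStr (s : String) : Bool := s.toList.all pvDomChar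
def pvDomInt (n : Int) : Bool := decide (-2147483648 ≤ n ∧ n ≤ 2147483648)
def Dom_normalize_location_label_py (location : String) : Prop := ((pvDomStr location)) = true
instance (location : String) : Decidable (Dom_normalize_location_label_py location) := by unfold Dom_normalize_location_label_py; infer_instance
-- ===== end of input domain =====

-- B replaces A's staged split-and-strip passes by one left-to-right character scan with an
-- accumulator and an early return at the first separator (simpler decomposition; same cost).

-- ===== PORT A =====
def normalize_location_label_py (location : String) : String :=
  -- text = str(location).strip()   (location is already a str, so str() is the identity)
  let text := PySem.Chars.strip location.toList
  if text = [] then "N/A"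
  else
    -- for separator in ("(", ","): if separator in text: text = text.split(separator, 1)[0].strip()
    let text := [['('], [',']].foldl
      (fun t sep =>
        if PySem.Chars.isIn sep t then
          -- split(sep, 1) always returns a non-empty list, so [0] is its head
          PySem.Chars.strip ((PySem.Chars.splitOnMax t sep 1).headD [])
        else t) text
    if text = [] then "N/A" else String.mk text

-- ===== PORT B =====
-- the for-loop of Source B: `prefix` is the accumulator, an early return at the first separator,
-- falling through to `return text or "N/A"`
def pvAltLoop (text : List Char) : List Char → List Char → String
  | _, [] => if text = [] then "N/A" else String.mk text      -- return text or "N/A"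
  | pfx, ch :: rest =>
    if PySem.Chars.isIn [ch] ['(', ','] then                  -- if ch in "(,":
      let cut := PySem.Chars.strip pfx                        --   cut = "".join(prefix).strip()
      if cut = [] then "N/A" else String.mk cut               --   return cut or "N/A"
    else pvAltLoop text (pfx ++ [ch]) rest                    -- prefix.append(ch)

def normalize_location_label_py_alt (location : String) : String :=
  let text := PySem.Chars.strip location.toList
  pvAltLoop text [] text

-- ===== PRECONDITION & SPEC =====
def Spec_normalize_location_label_py (location : String) (out : String) : Prop := out = normalize_location_label_py_alt location
instance (location : String) (out : String) : Decidable (Spec_normalize_location_label_py location out) := by unfold Spec_normalize_location_label_py; infer_instance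

-- ===== CLAIM (what is proved, stated in full; the proofs are below) =====
def Claim_equal_normalize_location_label_py : Prop := ∀ (location : String), Dom_normalize_location_label_py location → Spec_normalize_location_label_py location (normalize_location_label_py location)

-- ===== LEMMAS AND PROOFS =====

theorem find_go_single (c : Char) : ∀ (l : List Char) (k : Nat),
    PySem.Chars.find.go [c] l k =
      if c ∈ l then ((k + (l.takeWhile (· != c)).length : Nat) : Int) else -1 := by
  intro l
  induction l with
  | nil => intro k; simp [PySem.Chars.find.go]
  | cons h t ih =>
    intro k
    rw [PySem.Chars.find.go]
    by_cases hc : h = c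
    · subst hc
      simp [List.isPrefixOf, List.takeWhile_cons]
    · have hp : List.isPrefixOf [c] (h :: t) = false := by
        simp [List.isPrefixOf]
        exact fun e => absurd (Eq.symm e) hc
      rw [hp]
      simp only [List.mem_cons, List.takeWhile_cons, ih]
      have hne : (h != c) = true := by simp [hc]
      rw [hne]
      simp only [if_true]
      by_cases hm : c ∈ t
      · simp [hm, hc, Ne.symm hc]
        push_cast
        omega
      · simp [hm]
        exact fun e => absurd (Eq.symm e) hc

theorem find_single (c : Char) (t : List Char) :
    PySem.Chars.find t [c] =
      if c ∈ t then (((t.takeWhile (· != c)).length : Nat) : Int) else -1 := by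
  rw [PySem.Chars.find, find_go_single]
  simp

theorem isIn_single (c : Char) (t : List Char) :
    PySem.Chars.isIn [c] t = decide (c ∈ t) := by
  rw [PySem.Chars.isIn, find_single]
  by_cases hm : c ∈ t <;> simp [hm]

-- after the first piece is emitted (m = 0), the head of the final result is the piece already in acc
theorem splitGo_zero (c : Char) (fuel : Nat) (l piece : List Char) :
    ∃ z, PySem.Chars.splitOnMax.go [c] fuel 0 l [] [piece] = [piece, z] := by
  match fuel, l with
  | 0, l => exact ⟨l, by rw [PySem.Chars.splitOnMax.go]; simp⟩
  | Nat.succ f, [] => exact ⟨[], by rw [PySem.Chars.splitOnMax.go]; simp; omega⟩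
  | Nat.succ f, h :: t => exact ⟨h :: t, by rw [PySem.Chars.splitOnMax.go]; simp⟩

theorem splitGo_head (c : Char) : ∀ (fuel : Nat) (l cur : List Char), c ∈ l → l.length < fuel →
    (PySem.Chars.splitOnMax.go [c] fuel 1 l cur []).headD [] =
      cur.reverse ++ l.takeWhile (· != c) := by
  intro fuel
  induction fuel with
  | zero => intro l cur hm hlen; omega
  | succ f ih =>
    intro l cur hm hlen
    match l, hm with
    | h :: t, hm =>
      rw [PySem.Chars.splitOnMax.go]
      simp only [show (1 : Nat) ≠ 0 from one_ne_zero, if_false]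
      by_cases hc : h = c
      · subst hc
        have hp : List.isPrefixOf [h] (h :: t) = true := by simp [List.isPrefixOf]
        rw [hp]
        simp only [if_true]
        obtain ⟨z, hz⟩ := splitGo_zero h f (List.drop [h].length (h :: t)) cur.reverse
        simp only [List.length_cons, List.length_nil, List.drop_succ_cons, List.drop_zero] at hz ⊢
        rw [hz]
        simp [List.takeWhile_cons]
      · have hp : List.isPrefixOf [c] (h :: t) = false := by
          simp [List.isPrefixOf]; exact fun e => absurd (Eq.symm e) hc
        rw [hp]
        simp only [Bool.false_eq_true, if_false]
        have hmt : c ∈ t := by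
          rcases List.mem_cons.mp hm with e | e
          · exact absurd (Eq.symm e) hc
          · exact e
        rw [ih t (h :: cur) hmt (by simp at hlen ⊢; omega)]
        simp [List.takeWhile_cons, Ne.symm, hc]

theorem split_first (c : Char) (t : List Char) (hm : c ∈ t) :
    (PySem.Chars.splitOnMax t [c] 1).headD [] = t.takeWhile (· != c) := by
  rw [PySem.Chars.splitOnMax]
  simp only [show ¬((1:Int) < 0) by norm_num, if_false]
  have := splitGo_head c (t.length + 1) t [] hm (by omega)
  simpa using this

-- takeWhile (≠ c) only depends on a prefix containing c
theorem takeWhile_ne_of_prefix (c : Char) {w t : List Char} (hp : w <+: t) (hm : c ∈ w) :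
    t.takeWhile (· != c) = w.takeWhile (· != c) := by
  obtain ⟨r, rfl⟩ := hp
  rw [List.takeWhile_append]
  split
  · next h =>
    have : w.takeWhile (· != c) = w := List.IsPrefix.eq_of_length (List.takeWhile_prefix _) h
    have := List.mem_takeWhile_imp (l := w) (p := (· != c)) (this ▸ hm)
    simp at this
  · rfl

theorem mem_of_mem_strip {c : Char} {u : List Char} (h : c ∈ PySem.Chars.strip u) : c ∈ u := by
  have h1 : c ∈ PySem.Chars.lstrip u := by
    have := (List.dropWhile_sublist (p := PySem.Chars.isspace) (l := (PySem.Chars.lstrip u).reverse))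
    rw [PySem.Chars.strip, PySem.Chars.rstrip] at h
    have := (this.reverse).mem (by simpa using h)
    simpa using this
  rw [PySem.Chars.lstrip] at h1
  exact (List.dropWhile_sublist _).mem h1

theorem mem_lstrip_of_mem {c : Char} {u : List Char} (hc : PySem.Chars.isspace c = false)
    (h : c ∈ u) : c ∈ PySem.Chars.lstrip u := by
  rw [PySem.Chars.lstrip]
  have := List.takeWhile_append_dropWhile (p := PySem.Chars.isspace) (l := u)
  rcases List.mem_append.mp (this ▸ h) with h1 | h1
  · have := List.mem_takeWhile_imp h1
    rw [hc] at this; cases this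
  · exact h1

theorem mem_rstrip_of_mem {c : Char} {u : List Char} (hc : PySem.Chars.isspace c = false)
    (h : c ∈ u) : c ∈ PySem.Chars.rstrip u := by
  rw [PySem.Chars.rstrip]
  have hrev : c ∈ u.reverse := by simpa using h
  have := List.takeWhile_append_dropWhile (p := PySem.Chars.isspace) (l := u.reverse)
  rcases List.mem_append.mp (this ▸ hrev) with h1 | h1
  · have := List.mem_takeWhile_imp h1
    rw [hc] at this; cases this
  · simpa using h1

theorem mem_strip_of_mem {c : Char} {u : List Char} (hc : PySem.Chars.isspace c = false)
    (h : c ∈ u) : c ∈ PySem.Chars.strip u :=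
  mem_rstrip_of_mem hc (mem_lstrip_of_mem hc h)

-- rstrip is a prefix whose complement is all-whitespace
theorem rstrip_decomp (v : List Char) :
    ∃ w, v = PySem.Chars.rstrip v ++ w ∧ ∀ x ∈ w, PySem.Chars.isspace x = true := by
  refine ⟨(v.reverse.takeWhile PySem.Chars.isspace).reverse, ?_, ?_⟩
  · rw [PySem.Chars.rstrip]
    have := List.takeWhile_append_dropWhile (p := PySem.Chars.isspace) (l := v.reverse)
    rw [← List.reverse_append, this, List.reverse_reverse]
  · intro x hx
    exact List.mem_takeWhile_imp (by simpa using hx)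

theorem takeWhile_ne_rstrip (c : Char) {v : List Char} (hm : c ∈ PySem.Chars.rstrip v) :
    v.takeWhile (· != c) = (PySem.Chars.rstrip v).takeWhile (· != c) := by
  obtain ⟨w, hw, -⟩ := rstrip_decomp v
  exact takeWhile_ne_of_prefix c ⟨w, hw.symm⟩ hm

theorem takeWhile_ne_lstrip (c : Char) (hc : PySem.Chars.isspace c = false) (u : List Char) :
    (PySem.Chars.lstrip u).takeWhile (· != c) = PySem.Chars.lstrip (u.takeWhile (· != c)) := by
  induction u with
  | nil => simp [PySem.Chars.lstrip]
  | cons h t ih =>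
    by_cases hws : PySem.Chars.isspace h = true
    · have hhc : (h != c) = true := by
        simp; intro e; rw [e] at hws; rw [hws] at hc; cases hc
      simp [PySem.Chars.lstrip, List.takeWhile_cons, hws, hhc] at ih ⊢
      exact ih
    · by_cases hhc : h = c
      · subst hhc
        simp [PySem.Chars.lstrip, List.takeWhile_cons, hws]
      · simp [PySem.Chars.lstrip, List.takeWhile_cons, hws, hhc]

theorem lstrip_idem (u : List Char) :
    PySem.Chars.lstrip (PySem.Chars.lstrip u) = PySem.Chars.lstrip u := by
  simp [PySem.Chars.lstrip]
  induction u with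
  | nil => simp
  | cons h t ih =>
    by_cases hws : PySem.Chars.isspace h = true
    · simpa [List.dropWhile_cons, hws] using ih
    · simp [List.dropWhile_cons, hws]

theorem strip_lstrip (u : List Char) :
    PySem.Chars.strip (PySem.Chars.lstrip u) = PySem.Chars.strip u := by
  rw [PySem.Chars.strip, PySem.Chars.strip, lstrip_idem]

-- the composite: stripping before cutting at the first c does not change the stripped cut
theorem strip_takeWhile_strip (c : Char) (hc : PySem.Chars.isspace c = false)
    {u : List Char} (hm : c ∈ u) :
    PySem.Chars.strip ((PySem.Chars.strip u).takeWhile (· != c)) =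
      PySem.Chars.strip (u.takeWhile (· != c)) := by
  have h2 : c ∈ PySem.Chars.strip u := mem_strip_of_mem hc hm
  rw [show PySem.Chars.strip u = PySem.Chars.rstrip (PySem.Chars.lstrip u) from rfl] at h2 ⊢
  rw [← takeWhile_ne_rstrip c h2, takeWhile_ne_lstrip c hc, strip_lstrip]

theorem takeWhile_all (p : Char → Bool) : ∀ (l : List Char), (∀ x ∈ l, p x = true) → l.takeWhile p = l
  | [], _ => rfl
  | h :: t, H => by
    simp [List.takeWhile_cons, H h (by simp),
      takeWhile_all p t (fun x hx => H x (by simp [hx]))]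

theorem takeWhile_pair : ∀ t : List Char,
    ((t.takeWhile (· != '(')).takeWhile (· != ',')) = t.takeWhile (fun c => c != '(' && c != ',')
  | [] => rfl
  | h :: t => by
    by_cases h1 : h = '('
    · simp [List.takeWhile_cons, h1]
    · by_cases h2 : h = ','
      · simp [List.takeWhile_cons, h1, h2]
      · simp [List.takeWhile_cons, h1, h2, takeWhile_pair t]

-- characterization of Source B's scan loop: it cuts the remaining input at the first separator
theorem pvAltLoop_eq (text : List Char) : ∀ (l pfx : List Char),
    pvAltLoop text pfx l =
      if '(' ∈ l ∨ ',' ∈ l then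
        (let cut := PySem.Chars.strip (pfx ++ l.takeWhile (fun c => c != '(' && c != ','));
         if cut = [] then "N/A" else String.mk cut)
      else (if text = [] then "N/A" else String.mk text) := by
  intro l
  induction l with
  | nil => intro pfx; simp [pvAltLoop]
  | cons ch rest ih =>
    intro pfx
    rw [pvAltLoop, isIn_single ch ['(', ',']]
    by_cases hs : ch ∈ ['(', ',']
    · have h1 : ch = '(' ∨ ch = ',' := by simpa using hs
      have hpred : (ch != '(' && ch != ',') = false := by
        rcases h1 with h | h <;> simp [h]
      have hcond : '(' ∈ ch :: rest ∨ ',' ∈ ch :: rest := by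
        rcases h1 with h | h
        · exact Or.inl (by simp [h])
        · exact Or.inr (by simp [h])
      simp only [hs, decide_true, if_true]
      conv_rhs => rw [if_pos hcond]
      simp [List.takeWhile_cons, hpred]
    · have h1 : ch ≠ '(' ∧ ch ≠ ',' := by
        constructor <;> (intro e; exact hs (by simp [e]))
      have hpred : (ch != '(' && ch != ',') = true := by simp [h1.1, h1.2]
      have hiff : ('(' ∈ ch :: rest ∨ ',' ∈ ch :: rest) ↔ ('(' ∈ rest ∨ ',' ∈ rest) := by
        constructor
        · rintro (h | h) <;> rcases List.mem_cons.mp h with e | e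
          · exact absurd e.symm h1.1
          · exact Or.inl e
          · exact absurd e.symm h1.2
          · exact Or.inr e
        · rintro (h | h)
          · exact Or.inl (List.mem_cons_of_mem ch h)
          · exact Or.inr (List.mem_cons_of_mem ch h)
      simp only [hs, decide_false, Bool.false_eq_true, if_false]
      rw [ih (pfx ++ [ch])]
      by_cases hr : '(' ∈ rest ∨ ',' ∈ rest
      · rw [if_pos hr]
        conv_rhs => rw [if_pos (hiff.mpr hr)]
        simp [List.takeWhile_cons, hpred]
      · rw [if_neg hr]
        conv_rhs => rw [if_neg (fun hc => hr (hiff.mp hc))]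

-- characterization of A's two staged split-and-strip passes: together they cut at the earliest separator
theorem foldlA_eq (t : List Char) :
    ([['('], [',']].foldl
      (fun u sep => if PySem.Chars.isIn sep u then
          PySem.Chars.strip ((PySem.Chars.splitOnMax u sep 1).headD []) else u) t)
    = if '(' ∈ t ∨ ',' ∈ t then
        PySem.Chars.strip (t.takeWhile (fun c => c != '(' && c != ','))
      else t := by
  have hcws : PySem.Chars.isspace ',' = false := by decide
  simp only [List.foldl_cons, List.foldl_nil]
  rw [isIn_single '(' t]
  by_cases h1 : '(' ∈ t
  · simp only [h1, decide_true, if_true, true_or, if_true]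
    rw [split_first '(' t h1, isIn_single ',' (PySem.Chars.strip (t.takeWhile (· != '(')))]
    by_cases h2 : ',' ∈ PySem.Chars.strip (t.takeWhile (· != '('))
    · simp only [h2, decide_true, if_true]
      rw [split_first ',' _ h2, strip_takeWhile_strip ',' hcws (mem_of_mem_strip h2),
        takeWhile_pair]
    · simp only [h2, decide_false, Bool.false_eq_true, if_false]
      have hnP : ',' ∉ t.takeWhile (· != '(') := fun hm => h2 (mem_strip_of_mem hcws hm)
      rw [← takeWhile_pair,
        takeWhile_all (· != ',') (t.takeWhile (· != '(')) (by
          intro x hx; simp; intro e; exact hnP (e ▸ hx))]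
  · simp only [h1, decide_false, Bool.false_eq_true, if_false, false_or]
    rw [isIn_single ',' t]
    by_cases h2 : ',' ∈ t
    · simp only [h2, decide_true, if_true]
      rw [split_first ',' t h2, ← takeWhile_pair,
        takeWhile_all (· != '(') t (by
          intro x hx; simp; intro e; exact h1 (e ▸ hx))]
    · simp only [h2, decide_false, Bool.false_eq_true, if_false]

-- ===== VERDICT (by name: the statement is the Claim_ definition above) =====
theorem normalize_location_label_py_spec : Claim_equal_normalize_location_label_py := by
  intro location _
  unfold Spec_normalize_location_label_py normalize_location_label_py normalize_location_label_py_alt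
  rw [pvAltLoop_eq]
  by_cases h : PySem.Chars.strip location.toList = []
  · simp [h]
  · simp only [h, if_false, List.nil_append]
    rw [foldlA_eq]
    by_cases hs : '(' ∈ PySem.Chars.strip location.toList ∨ ',' ∈ PySem.Chars.strip location.toList
    · simp only [hs, if_true]
    · simp only [hs, if_false, h]
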